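-- pv_equiv track=rewrite | github.com/rafeeJ/aoc-22 | day6/day6.py | general_solution
-- ===== SOURCE A (Python) =====
-- def check_valid(chars, target):
--     arr = list(chars)
--     if len(set(arr)) == target:
--         return True
--     return False
--
-- def general_solution(inp, target):
--     idx = 0
--     processed = ''
--     while idx < len(inp):
--         processed += inp[idx]
--         idx += 1
--         if idx < target: continue
--         if check_valid(processed[-target:], target):
--             return idx
-- ===== SOURCE B (Python) =====
-- def general_solution(inp, target):
--     # One pass: track last-seen index of each char; L = length of the longest
--     # duplicate-free suffix ending at i. First i with L == target answers.
--     last = {}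
--     L = 0
--     for i, ch in enumerate(inp):
--         prev = last.get(ch, -1)
--         L = min(L + 1, i - prev)
--         last[ch] = i
--         if L == target:
--             return i + 1
-- ===== Notes on version B (the rewrite author's own statement) =====
-- stated objective: faster
-- what changed: Replaced the rebuild-a-window-and-count-distinct check at every position (O(n*target) via set() on each length-target slice) by a single pass that maintains, with a last-seen-index map, the length of the longest duplicate-free suffix and returns at the first position where it reaches target.
import Mathlib
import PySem

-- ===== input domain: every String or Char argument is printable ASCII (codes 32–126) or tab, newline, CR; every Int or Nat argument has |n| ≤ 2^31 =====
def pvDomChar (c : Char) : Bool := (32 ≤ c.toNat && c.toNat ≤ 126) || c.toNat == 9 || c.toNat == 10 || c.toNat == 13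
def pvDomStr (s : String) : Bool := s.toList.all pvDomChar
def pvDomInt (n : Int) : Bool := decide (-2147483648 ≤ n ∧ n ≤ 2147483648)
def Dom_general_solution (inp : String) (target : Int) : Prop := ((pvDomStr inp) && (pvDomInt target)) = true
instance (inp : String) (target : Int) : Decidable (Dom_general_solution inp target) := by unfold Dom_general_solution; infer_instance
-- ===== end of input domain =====

-- B replaces A's per-position rebuild-window-and-count-distinct check by a single pass that
-- maintains the longest duplicate-free suffix length via a last-seen-index map (objective: faster).

-- ===== PORT A =====
-- check_valid(chars, target): arr = list(chars); return len(set(arr)) == target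
def check_valid (chars : List Char) (target : Int) : Bool :=
  let arr := chars
  if ((PySem.Set.ofList arr).length : Int) = target then true else false

-- while idx < len(inp): processed += inp[idx]; idx += 1; if idx < target: continue;
-- if check_valid(processed[-target:], target): return idx
def gsA_loop (s : List Char) (target : Int) (idx : Nat) (processed : List Char) : Option Int :=
  if hlt : idx < s.length then
    let processed' := processed ++ [s[idx]]
    let idx' := idx + 1
    if (idx' : Int) < target then gsA_loop s target idx' processed'
    else if check_valid (PySem.List.slice processed' (some (-target)) none) target then
      some (idx' : Int)
    else gsA_loop s target idx' processed'
  else none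
termination_by s.length - idx
decreasing_by all_goals omega

def general_solution (inp : String) (target : Int) : Option Int :=
  gsA_loop inp.toList target 0 []

-- ===== PORT B =====
-- for i, ch in enumerate(inp): prev = last.get(ch, -1); L = min(L + 1, i - prev);
-- last[ch] = i; if L == target: return i + 1
def gsB_loop (s : List Char) (target : Int) (i : Nat)
    (last : PySem.Dict Char Int) (L : Int) : Option Int :=
  if hlt : i < s.length then
    let ch := s[i]
    let prev := last.getD ch (-1)
    let L' := min (L + 1) ((i : Int) - prev)
    let last' := last.insert ch (i : Int)
    if L' = target then some ((i : Int) + 1)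
    else gsB_loop s target (i + 1) last' L'
  else none
termination_by s.length - i
decreasing_by omega

def general_solution_alt (inp : String) (target : Int) : Option Int :=
  gsB_loop inp.toList target 0 PySem.Dict.empty 0

-- ===== PRECONDITION & SPEC =====
def Spec_general_solution (inp : String) (target : Int) (out : Option Int) : Prop := out = general_solution_alt inp target
instance (inp : String) (target : Int) (out : Option Int) : Decidable (Spec_general_solution inp target out) := by unfold Spec_general_solution; infer_instance

-- ===== CLAIM (what is proved, stated in full; the proofs are below) =====
def Claim_equal_general_solution : Prop := ∀ (inp : String) (target : Int), Dom_general_solution inp target → Spec_general_solution inp target (general_solution inp target)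

-- ===== LEMMAS AND PROOFS =====

def lnp : List Char → Nat
  | [] => 0
  | c :: cs => min (lnp cs) (cs.idxOf c) + 1

theorem lnp_le_length (l : List Char) : lnp l ≤ l.length := by
  induction l with
  | nil => simp [lnp]
  | cons c cs ih => simp only [lnp, List.length_cons]; omega

theorem take_nodup_iff (l : List Char) (m : Nat) (hm : m ≤ l.length) :
    (l.take m).Nodup ↔ m ≤ lnp l := by
  induction l generalizing m with
  | nil => simp at hm; simp [hm, lnp]
  | cons c cs ih =>
    cases m with
    | zero => simp
    | succ m' =>
      simp only [List.take_succ_cons, List.nodup_cons, lnp]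
      have hm' : m' ≤ cs.length := by simpa using hm
      have h1 : c ∉ cs.take m' ↔ m' ≤ List.idxOf c cs := by
        by_cases hc : c ∈ cs
        · rw [List.mem_take_iff_idxOf_lt hc]; omega
        · simp only [List.idxOf_of_notMem hc]
          exact ⟨fun _ => by omega, fun _ hmem => hc (List.mem_of_mem_take hmem)⟩
      rw [h1, ih m' hm']
      omega

theorem ofList_sublist (l : List Char) : (PySem.Set.ofList l).Sublist l := by
  induction l with
  | nil => simp [PySem.Set.ofList, PySem.Set.empty]
  | cons c cs ih =>
    rw [PySem.Set.ofList_cons]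
    exact List.Sublist.cons₂ c (List.filter_sublist.trans ih)

theorem ofList_length_eq_iff (l : List Char) :
    ((PySem.Set.ofList l).length : Int) = (l.length : Int) ↔ l.Nodup := by
  constructor
  · intro h
    have h' : (PySem.Set.ofList l).length = l.length := by exact_mod_cast h
    have := (ofList_sublist l).eq_of_length h'
    rw [← this]; exact PySem.Set.nodup_ofList l
  · intro h; rw [PySem.Set.ofList_eq_self_of_nodup _ h]

-- distinct-count of the last-target window == target  ↔  target ≤ lnp of the reversed prefix
theorem check_valid_slice (s : List Char) (i : Nat) (hi : i < s.length) (t : Int)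
    (ht1 : 1 ≤ t) (ht2 : t ≤ (i : Int) + 1) :
    check_valid (PySem.List.slice (s.take (i+1)) (some (-t)) none) t = true ↔
      t ≤ (lnp (s.take (i+1)).reverse : Int) := by
  set p := s.take (i+1) with hp
  have hlen : p.length = i + 1 := by
    rw [hp, List.length_take]; omega
  obtain ⟨k, hk, rfl⟩ : ∃ k : Nat, 0 < k ∧ t = (k : Int) :=
    ⟨t.toNat, by omega, by omega⟩
  rw [PySem.List.slice_from_neg_natCast p k hk]
  have hkl : k ≤ p.length := by omega
  have hdlen : (p.drop (p.length - k)).length = k := by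
    rw [List.length_drop]; omega
  have h1 : check_valid (p.drop (p.length - k)) (k : Int) = true ↔
      ((PySem.Set.ofList (p.drop (p.length - k))).length : Int) = ((p.drop (p.length - k)).length : Int) := by
    rw [hdlen]; simp [check_valid]
  rw [h1, ofList_length_eq_iff, ← List.nodup_reverse, List.reverse_drop]
  have h2 : p.length - (p.length - k) = k := by omega
  rw [h2, take_nodup_iff _ k (by simpa using hkl)]
  omega

theorem gsA_eq_gsB (s : List Char) (target : Int) :
    ∀ (k i : Nat) (last : PySem.Dict Char Int) (L : Int), s.length - i = k → i ≤ s.length →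
    L = (lnp (s.take i).reverse : Int) →
    (∀ c, last.getD c (-1) = (i : Int) - 1 - (((s.take i).reverse.idxOf c : Nat) : Int)) →
    (1 ≤ target → (lnp (s.take i).reverse : Int) < target) →
    gsA_loop s target i (s.take i) = gsB_loop s target i last L := by
  intro k
  induction k with
  | zero =>
    intro i last L hk hi hL hlast hmiss
    have h : ¬ i < s.length := by omega
    rw [gsA_loop, gsB_loop, dif_neg h, dif_neg h]
  | succ k ih =>
    intro i last L hk hi hL hlast hmiss
    have hlt : i < s.length := by omega
    set r := (s.take i).reverse with hr
    have htake : s.take (i+1) = s.take i ++ [s[i]] := by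
      rw [List.take_succ, List.getElem?_eq_getElem hlt]; rfl
    have hr' : (s.take (i+1)).reverse = s[i] :: r := by
      rw [htake, List.reverse_append]; rfl
    have hlnp' : lnp (s[i] :: r) = min (lnp r) (r.idxOf s[i]) + 1 := rfl
    have hrlen : r.length = i := by
      rw [hr, List.length_reverse, List.length_take]; omega
    have hlnp_le : lnp (s[i] :: r) ≤ i + 1 := by
      have h1 := lnp_le_length (s[i] :: r)
      simp only [List.length_cons, hrlen] at h1; exact h1
    have hlnp_step : lnp (s[i] :: r) ≤ lnp r + 1 := by rw [hlnp']; omega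
    have hlnp_pos : 1 ≤ lnp (s[i] :: r) := by rw [hlnp']; omega
    have hL'eq : min (L + 1) ((i : Int) - last.getD s[i] (-1)) = ((lnp (s[i] :: r) : Nat) : Int) := by
      have hidx : r.idxOf s[i] ≤ i := by
        have := List.idxOf_le_length (a := s[i]) (l := r); omega
      rw [hlast s[i], hL, hlnp']; push_cast; omega
    have hlast' : ∀ c, (last.insert s[i] (i : Int)).getD c (-1)
        = ((i+1 : Nat) : Int) - 1 - (((s.take (i+1)).reverse.idxOf c : Nat) : Int) := by
      intro c
      rw [hr', PySem.Dict.getD_insert]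
      by_cases hc : c = s[i]
      · subst hc; rw [if_pos rfl, List.idxOf_cons_self]; push_cast; omega
      · rw [if_neg hc, hlast c, List.idxOf_cons_ne r (fun h => hc h.symm)]
        push_cast [Nat.succ_eq_add_one]; omega
    rw [gsA_loop, gsB_loop]
    simp only [dif_pos hlt, hL'eq]
    by_cases hb : (((i+1 : Nat) : Int)) < target
    · have hBne : ¬ ((lnp (s[i] :: r) : Nat) : Int) = target := by push_cast at hb ⊢; omega
      rw [if_pos hb, if_neg hBne, ← htake]
      exact ih (i+1) _ _ (by omega) (by omega) (by rw [hr']) hlast'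
        (fun _ => by rw [hr']; push_cast at hb ⊢; omega)
    · rw [if_neg hb]
      by_cases ht : 1 ≤ target
      · have hcv := check_valid_slice s i hlt target ht (by push_cast at hb ⊢; omega)
        rw [hr', htake] at hcv
        by_cases hhit : ((lnp (s[i] :: r) : Nat) : Int) = target
        · rw [if_pos (hcv.mpr (le_of_eq hhit.symm)), if_pos hhit]
          norm_num
        · have hcf : ¬ check_valid (PySem.List.slice (s.take i ++ [s[i]]) (some (-target)) none) target = true := by
            intro hc
            have h1 := hcv.mp hc
            have h3 := hmiss ht
            push_cast at h1 h3 hhit ⊢; omega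
          rw [if_neg hcf, if_neg hhit, ← htake]
          exact ih (i+1) _ _ (by omega) (by omega) (by rw [hr']) hlast'
            (fun _ => by
              rw [hr']
              have h3 := hmiss ht
              omega)
      · have hcf : ¬ check_valid (PySem.List.slice (s.take i ++ [s[i]]) (some (-target)) none) target = true := by
          rw [PySem.List.slice_from (s.take i ++ [s[i]]) (a := -target) (by omega)]
          intro hc
          simp only [check_valid] at hc
          rcases Nat.lt_or_ge (-target).toNat (s.take i ++ [s[i]]).length with hd | hd
          · -- dropped list nonempty: its ofList is nonempty, so length ≥ 1 > 0 ≥ target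
            have hne : (s.take i ++ [s[i]]).drop (-target).toNat ≠ [] := by
              intro h0
              have := List.drop_eq_nil_iff.mp h0
              omega
            obtain ⟨c, cs, hcons⟩ := List.exists_cons_of_ne_nil hne
            have hmem : c ∈ PySem.Set.ofList ((s.take i ++ [s[i]]).drop (-target).toNat) := by
              rw [PySem.Set.mem_ofList, hcons]; exact List.mem_cons_self
            have hpos : 1 ≤ (PySem.Set.ofList ((s.take i ++ [s[i]]).drop (-target).toNat)).length :=
              List.length_pos_of_mem hmem
            split at hc
            · rename_i h0; omega
            · exact absurd hc (by simp)
          · -- t = 0 is impossible here: -target ≥ len forces target ≤ -len < 0... no: target ≤ 0, -target ≥ 0; toNat ≥ len means drop = [], ofList [] length 0 = target → target = 0 → toNat 0 ≥ len = i+1 ≥ 1, contradiction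
            have hdrop : (s.take i ++ [s[i]]).drop (-target).toNat = [] := by
              rw [List.drop_eq_nil_iff]; omega
            rw [hdrop] at hc
            have hlen1 : (s.take i ++ [s[i]]).length = i + 1 := by
              rw [List.length_append, List.length_take]; simp; omega
            split at hc
            · rename_i h0
              simp [PySem.Set.ofList, PySem.Set.empty] at h0
              omega
            · exact absurd hc (by simp)
        have hBne : ¬ ((lnp (s[i] :: r) : Nat) : Int) = target := by omega
        rw [if_neg hcf, if_neg hBne, ← htake]
        exact ih (i+1) _ _ (by omega) (by omega) (by rw [hr']) hlast'
          (fun h1 => absurd h1 (by omega))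

-- ===== VERDICT (by name: the statement is the Claim_ definition above) =====
theorem general_solution_spec : Claim_equal_general_solution := by
  intro inp target _
  show general_solution inp target = general_solution_alt inp target
  have h := gsA_eq_gsB inp.toList target inp.toList.length 0 PySem.Dict.empty 0
    (by omega) (Nat.zero_le _) (by simp [lnp]) (fun c => by simp [PySem.Dict.getD_empty])
    (fun _ => by simp [lnp]; omega)
  simpa [general_solution, general_solution_alt] using h
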